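-- pv_equiv track=rewrite | github.com/Sanjana-0706/opensource | visaa_prep/Missing Numbers.py | missingNumbers
-- ===== SOURCE A (Python) =====
-- def missingNumbers(arr, brr):
--     # Write your code here
--     a={}
--     b={}
--     for num in arr:
--         a[num]=a.get(num,0)+1
--     for num in brr:
--         b[num] = b.get(num,0)+1
--     m=[]
--     for num,freq in b.items():
--         if num not in a or a[num]<freq:
--             m.append(num)
--     return sorted(set(m))
-- ===== SOURCE B (Python) =====
-- def missingNumbers(arr, brr):
--     # Sort both lists, then merge-walk them with two pointers, grouping equal
--     # runs: for each distinct value of brr (in increasing order) compare its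
--     # run length in sorted(brr) with its run length in sorted(arr) and emit it
--     # once when brr has the longer run.  The output is built already sorted.
--     sa = sorted(arr)
--     sb = sorted(brr)
--     n, m = len(sa), len(sb)
--     res = []
--     i = j = 0
--     while j < m:
--         v = sb[j]
--         cb = 0
--         while j < m and sb[j] == v:
--             cb += 1
--             j += 1
--         while i < n and sa[i] < v:
--             i += 1
--         ca = 0
--         while i < n and sa[i] == v:
--             ca += 1
--             i += 1
--         if ca < cb:
--             res.append(v)
--     return res
-- ===== Notes on version B (the rewrite author's own statement) =====
-- stated objective: alternative
-- what changed: Replaces A's two frequency dictionaries and key scan with a sort-then-merge two-pointer walk: both lists are sorted and traversed once in parallel, run lengths of equal values are compared in place, and the result is emitted already in increasing order with no dicts, no set and no final sort.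
import Mathlib
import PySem

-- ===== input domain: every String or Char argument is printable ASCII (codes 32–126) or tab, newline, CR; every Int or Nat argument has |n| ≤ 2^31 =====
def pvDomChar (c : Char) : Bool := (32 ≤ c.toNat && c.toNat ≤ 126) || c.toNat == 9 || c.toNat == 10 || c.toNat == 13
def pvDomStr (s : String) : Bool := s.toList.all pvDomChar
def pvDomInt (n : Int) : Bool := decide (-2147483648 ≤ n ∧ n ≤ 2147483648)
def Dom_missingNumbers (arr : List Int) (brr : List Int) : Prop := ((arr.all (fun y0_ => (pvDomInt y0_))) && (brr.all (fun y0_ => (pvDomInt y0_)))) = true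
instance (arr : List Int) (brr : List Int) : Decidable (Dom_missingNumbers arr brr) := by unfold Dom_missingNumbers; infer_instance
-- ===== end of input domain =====

-- B replaces the frequency dicts by sorting both lists and merge-walking them
-- with two pointers, comparing run lengths of equal values (objective: alternative).

-- ===== PORT A =====
def missingNumbers (arr : List Int) (brr : List Int) : List Int :=
  let a : PySem.Dict Int Int := arr.foldl (fun d num => d.insert num (d.getD num 0 + 1)) PySem.Dict.empty
  let b : PySem.Dict Int Int := brr.foldl (fun d num => d.insert num (d.getD num 0 + 1)) PySem.Dict.empty
  let m : List Int := b.items.foldl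
    (fun m p => if !a.contains p.1 || decide (a.getD p.1 0 < p.2) then m ++ [p.1] else m) []
  PySem.List.sorted (PySem.Set.ofList m) (fun x => x) false

-- ===== PORT B =====
-- the two-pointer merge walk of Source B: the index loops over the sorted arrays
-- become the structural recursion below; advancing a pointer over a run of
-- equal values (the inner 'while' loops) is takeWhile/dropWhile on the suffix.
def goMissing (sa : List Int) (sb : List Int) : List Int :=
  match sb with
  | [] => []
  | v :: t =>
    let cb := 1 + (t.takeWhile (fun y => y == v)).length
    let tb := t.dropWhile (fun y => y == v)
    let sa1 := sa.dropWhile (fun y => decide (y < v))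
    let ca := (sa1.takeWhile (fun y => y == v)).length
    let sa2 := sa1.dropWhile (fun y => y == v)
    if ca < cb then v :: goMissing sa2 tb else goMissing sa2 tb
termination_by sb.length
decreasing_by
  all_goals
    simp only [List.length_cons]
    exact Nat.lt_succ_of_le (List.length_dropWhile_le _ _)

def missingNumbers_alt (arr : List Int) (brr : List Int) : List Int :=
  goMissing (PySem.List.sorted arr (fun x => x) false) (PySem.List.sorted brr (fun x => x) false)

-- ===== PRECONDITION & SPEC =====
def Spec_missingNumbers (arr : List Int) (brr : List Int) (out : List Int) : Prop := out = missingNumbers_alt arr brr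
instance (arr : List Int) (brr : List Int) (out : List Int) : Decidable (Spec_missingNumbers arr brr out) := by unfold Spec_missingNumbers; infer_instance

-- ===== CLAIM (what is proved, stated in full; the proofs are below) =====
def Claim_equal_missingNumbers : Prop := ∀ (arr : List Int) (brr : List Int), Dom_missingNumbers arr brr → Spec_missingNumbers arr brr (missingNumbers arr brr)

-- ===== LEMMAS AND PROOFS =====

-- every element of a ≤-sorted list is ≥ its head
theorem pv_le_of_mem_sorted {a : Int} {l : List Int} (h : (a :: l).Pairwise (· ≤ ·)) :
    ∀ x ∈ a :: l, a ≤ x := by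
  intro x hx
  rcases List.mem_cons.1 hx with rfl | hx
  · exact le_refl x
  · exact (List.pairwise_cons.1 h).1 x hx

-- after dropping the prefix < v of a sorted list, everything is ≥ v
theorem pv_mem_dropWhile_lt {l : List Int} {v : Int} (h : l.Pairwise (· ≤ ·)) :
    ∀ x ∈ l.dropWhile (fun y => decide (y < v)), v ≤ x := by
  intro x hx
  have hpw : (l.dropWhile (fun y => decide (y < v))).Pairwise (· ≤ ·) :=
    List.Pairwise.sublist (List.dropWhile_sublist _) h
  cases hd : l.dropWhile (fun y => decide (y < v)) with
  | nil => rw [hd] at hx; cases hx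
  | cons h0 rest =>
    have h9 := List.head?_dropWhile_not (fun y => decide (y < v)) l
    rw [hd] at h9
    simp only [List.head?_cons, decide_eq_false_iff_not, not_lt] at h9
    rw [hd] at hpw hx
    exact le_trans h9 (pv_le_of_mem_sorted hpw x hx)

-- after dropping the run == v of a sorted list whose elements are ≥ v, everything is > v
theorem pv_mem_dropWhile_eq {l : List Int} {v : Int} (h : l.Pairwise (· ≤ ·))
    (hge : ∀ x ∈ l, v ≤ x) :
    ∀ x ∈ l.dropWhile (fun y => y == v), v < x := by
  intro x hx
  have hpw : (l.dropWhile (fun y => y == v)).Pairwise (· ≤ ·) :=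
    List.Pairwise.sublist (List.dropWhile_sublist _) h
  cases hd : l.dropWhile (fun y => y == v) with
  | nil => rw [hd] at hx; cases hx
  | cons h0 rest =>
    have h9 := List.head?_dropWhile_not (fun y => y == v) l
    rw [hd] at h9
    simp only [List.head?_cons, beq_eq_false_iff_ne, ne_eq] at h9
    have hmem : h0 ∈ l := (List.dropWhile_sublist _).subset (by rw [hd]; exact List.mem_cons_self)
    have hlt : v < h0 := lt_of_le_of_ne (hge h0 hmem) (Ne.symm h9)
    rw [hd] at hpw hx
    exact lt_of_lt_of_le hlt (pv_le_of_mem_sorted hpw x hx)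

-- dropping elements that can never equal v preserves the count of v
theorem pv_count_dropWhile {l : List Int} {p : Int → Bool} {v : Int}
    (h : ∀ x ∈ l, p x = true → x ≠ v) :
    (l.dropWhile p).count v = l.count v := by
  conv_rhs => rw [← List.takeWhile_append_dropWhile (p := p) (l := l)]
  rw [List.count_append]
  have h0 : (l.takeWhile p).count v = 0 := by
    rw [List.count_eq_zero]
    intro hv
    exact h v ((List.takeWhile_sublist _).subset hv) (List.mem_takeWhile_imp hv) rfl
  omega

-- in a run of elements == v, the count of v is the length
theorem pv_count_takeWhile (l : List Int) (v : Int) :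
    (l.takeWhile (fun y => y == v)).count v = (l.takeWhile (fun y => y == v)).length := by
  rw [List.count_eq_length]
  intro b hb
  have := List.mem_takeWhile_imp hb
  simp only [beq_iff_eq] at this
  omega

-- count of v in a sorted list with all elements ≥ v equals the head run length
theorem pv_count_run {l : List Int} {v : Int} (h : l.Pairwise (· ≤ ·))
    (hge : ∀ x ∈ l, v ≤ x) :
    l.count v = (l.takeWhile (fun y => y == v)).length := by
  conv_lhs => rw [← List.takeWhile_append_dropWhile (p := fun y => y == v) (l := l)]
  rw [List.count_append, pv_count_takeWhile]
  have h0 : (l.dropWhile (fun y => y == v)).count v = 0 := by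
    rw [List.count_eq_zero]
    intro hv
    exact absurd rfl (ne_of_gt (pv_mem_dropWhile_eq h hge v hv))
  omega

-- one unfolding of the merge walk
theorem goMissing_cons (sa : List Int) (v : Int) (t : List Int) :
    goMissing sa (v :: t) =
      (if ((sa.dropWhile (fun y => decide (y < v))).takeWhile (fun y => y == v)).length
          < 1 + (t.takeWhile (fun y => y == v)).length
       then v :: goMissing ((sa.dropWhile (fun y => decide (y < v))).dropWhile (fun y => y == v))
              (t.dropWhile (fun y => y == v))
       else goMissing ((sa.dropWhile (fun y => decide (y < v))).dropWhile (fun y => y == v))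
              (t.dropWhile (fun y => y == v))) := by
  rw [goMissing]

-- membership characterisation of the merge walk
theorem goMissing_mem : ∀ (n : Nat) (sa sb : List Int), sb.length ≤ n →
    sa.Pairwise (· ≤ ·) → sb.Pairwise (· ≤ ·) →
    ∀ x, x ∈ goMissing sa sb ↔ x ∈ sb ∧ sa.count x < sb.count x := by
  intro n
  induction n with
  | zero =>
    intro sa sb hlen _ _ x
    have hnil : sb = [] := List.eq_nil_of_length_eq_zero (Nat.le_zero.1 hlen)
    subst hnil
    simp [goMissing]
  | succ n ih =>
    intro sa sb hlen hsa hsb x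
    cases sb with
    | nil => simp [goMissing]
    | cons v t =>
      have hsb' : t.Pairwise (· ≤ ·) := (List.pairwise_cons.1 hsb).2
      have hget : ∀ y ∈ t, v ≤ y := (List.pairwise_cons.1 hsb).1
      set tb := t.dropWhile (fun y => y == v) with htb
      set sa1 := sa.dropWhile (fun y => decide (y < v)) with hsa1
      set sa2 := sa1.dropWhile (fun y => y == v) with hsa2
      have htb_sorted : tb.Pairwise (· ≤ ·) :=
        List.Pairwise.sublist (List.dropWhile_sublist _) hsb'
      have htb_gt : ∀ y ∈ tb, v < y := pv_mem_dropWhile_eq hsb' hget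
      have hsa1_sorted : sa1.Pairwise (· ≤ ·) :=
        List.Pairwise.sublist (List.dropWhile_sublist _) hsa
      have hge1 : ∀ y ∈ sa1, v ≤ y := pv_mem_dropWhile_lt hsa
      have hsa2_sorted : sa2.Pairwise (· ≤ ·) :=
        List.Pairwise.sublist (List.dropWhile_sublist _) hsa1_sorted
      have htblen : tb.length ≤ n := by
        have h1 : tb.length ≤ t.length := List.length_dropWhile_le _ _
        have h2 : t.length + 1 ≤ n + 1 := by simpa using hlen
        omega
      have IH := ih sa2 tb htblen hsa2_sorted htb_sorted
      -- the two run-length counts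
      have hcb : (v :: t).count v = (t.takeWhile (fun y => y == v)).length + 1 := by
        rw [List.count_cons_self, pv_count_run hsb' hget]
      have hca : sa.count v = (sa1.takeWhile (fun y => y == v)).length := by
        have h1 : sa1.count v = sa.count v := by
          rw [hsa1]
          exact pv_count_dropWhile (fun y _ hy => by
            simp only [decide_eq_true_eq] at hy
            omega)
        rw [← h1, pv_count_run hsa1_sorted hge1]
      rw [goMissing_cons, ← hsa1, ← hsa2, ← htb]
      by_cases hxv : x = v
      · subst hxv
        have hnot : x ∉ goMissing sa2 tb := by
          intro hmem
          exact absurd rfl (ne_of_gt (htb_gt x ((IH x).1 hmem).1))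
        split_ifs with hc
        · constructor
          · intro _
            refine ⟨by simp, ?_⟩
            rw [hca, hcb]
            omega
          · intro _
            simp
        · constructor
          · intro hmem
            exact (hnot hmem).elim
          · intro ⟨_, hcnt⟩
            rw [hca, hcb] at hcnt
            exact absurd hcnt (by omega)
      · have hxt_tb : x ∈ t ↔ x ∈ tb := by
          constructor
          · intro hxt
            have hsplit := List.takeWhile_append_dropWhile (p := fun y => y == v) (l := t)
            rw [← hsplit] at hxt
            rcases List.mem_append.1 hxt with h | h
            · have := List.mem_takeWhile_imp h
              simp only [beq_iff_eq] at this
              exact absurd this hxv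
            · exact h
          · intro hxtb
            exact (List.dropWhile_sublist _).subset hxtb
        have hmem_if : x ∈ (if ((sa1.takeWhile (fun y => y == v)).length
              < 1 + (t.takeWhile (fun y => y == v)).length)
            then v :: goMissing sa2 tb else goMissing sa2 tb) ↔ x ∈ goMissing sa2 tb := by
          split_ifs with hc
          · simp [List.mem_cons, hxv]
          · rfl
        rw [hmem_if, IH x]
        have hcount_t : (v :: t).count x = tb.count x := by
          rw [List.count_cons_of_ne (Ne.symm hxv)]
          rw [htb]
          exact (pv_count_dropWhile (fun y _ hy => by
            simp only [beq_iff_eq] at hy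
            subst hy
            exact fun h => hxv h.symm)).symm
        constructor
        · intro ⟨hxtb, hcnt⟩
          have hvx : v < x := htb_gt x hxtb
          have hsa_cnt : sa2.count x = sa.count x := by
            rw [hsa2, hsa1]
            rw [pv_count_dropWhile (fun y _ hy => by
              simp only [beq_iff_eq] at hy; omega)]
            exact pv_count_dropWhile (fun y _ hy => by
              simp only [decide_eq_true_eq] at hy; omega)
          refine ⟨List.mem_cons.2 (Or.inr (hxt_tb.2 hxtb)), ?_⟩
          rw [← hsa_cnt, hcount_t]
          exact hcnt
        · intro ⟨hxmem, hcnt⟩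
          have hxt : x ∈ t := by
            rcases List.mem_cons.1 hxmem with h | h
            · exact absurd h hxv
            · exact h
          have hxtb : x ∈ tb := hxt_tb.1 hxt
          have hvx : v < x := htb_gt x hxtb
          have hsa_cnt : sa2.count x = sa.count x := by
            rw [hsa2, hsa1]
            rw [pv_count_dropWhile (fun y _ hy => by
              simp only [beq_iff_eq] at hy; omega)]
            exact pv_count_dropWhile (fun y _ hy => by
              simp only [decide_eq_true_eq] at hy; omega)
          refine ⟨hxtb, ?_⟩
          rw [hsa_cnt, ← hcount_t]
          exact hcnt

-- the merge walk output is strictly increasing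
theorem goMissing_pairwise : ∀ (n : Nat) (sa sb : List Int), sb.length ≤ n →
    sa.Pairwise (· ≤ ·) → sb.Pairwise (· ≤ ·) →
    (goMissing sa sb).Pairwise (· < ·) := by
  intro n
  induction n with
  | zero =>
    intro sa sb hlen _ _
    have hnil : sb = [] := List.eq_nil_of_length_eq_zero (Nat.le_zero.1 hlen)
    subst hnil
    simp [goMissing]
  | succ n ih =>
    intro sa sb hlen hsa hsb
    cases sb with
    | nil => simp [goMissing]
    | cons v t =>
      have hsb' : t.Pairwise (· ≤ ·) := (List.pairwise_cons.1 hsb).2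
      have hget : ∀ y ∈ t, v ≤ y := (List.pairwise_cons.1 hsb).1
      set tb := t.dropWhile (fun y => y == v) with htb
      set sa1 := sa.dropWhile (fun y => decide (y < v)) with hsa1
      set sa2 := sa1.dropWhile (fun y => y == v) with hsa2
      have htb_sorted : tb.Pairwise (· ≤ ·) :=
        List.Pairwise.sublist (List.dropWhile_sublist _) hsb'
      have htb_gt : ∀ y ∈ tb, v < y := pv_mem_dropWhile_eq hsb' hget
      have hsa2_sorted : sa2.Pairwise (· ≤ ·) :=
        List.Pairwise.sublist (List.dropWhile_sublist _)
          (List.Pairwise.sublist (List.dropWhile_sublist _) hsa)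
      have htblen : tb.length ≤ n := by
        have h1 : tb.length ≤ t.length := List.length_dropWhile_le _ _
        have h2 : t.length + 1 ≤ n + 1 := by simpa using hlen
        omega
      have IHpw := ih sa2 tb htblen hsa2_sorted htb_sorted
      rw [goMissing_cons, ← hsa1, ← hsa2, ← htb]
      split_ifs with hc
      · refine List.pairwise_cons.2 ⟨?_, IHpw⟩
        intro y hy
        exact htb_gt y ((goMissing_mem n sa2 tb htblen hsa2_sorted htb_sorted y).1 hy).1
      · exact IHpw

-- port A computes: sort the distinct values of brr that have a larger count in brr
theorem missingNumbers_A_eq (arr brr : List Int) :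
    missingNumbers arr brr =
    PySem.List.sorted
      (PySem.Set.ofList ((PySem.Set.ofList brr).filter
        (fun v => decide (PySem.List.count arr v < PySem.List.count brr v)))) (fun x => x) false := by
  unfold missingNumbers
  dsimp only []
  rw [PySem.Dict.foldl_insert_getD_add_one_eq_counter]
  rw [PySem.Dict.foldl_insert_getD_add_one_eq_counter]
  rw [PySem.List.foldl_append_if]
  rw [PySem.Dict.items_counter, List.filter_map, List.map_map]
  simp only [Function.comp_def, List.nil_append, List.map_id']
  refine congrArg (fun l => PySem.List.sorted (PySem.Set.ofList l) (fun x => x) false) ?_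
  apply List.filter_congr
  intro v hv
  have hvb : v ∈ brr := (PySem.Set.mem_ofList brr v).1 hv
  have hb1 : 1 ≤ brr.count v := List.one_le_count_iff.2 hvb
  rw [PySem.Dict.getD_counter]
  by_cases hva : v ∈ arr
  · have h1 : (PySem.Dict.counter arr).contains v = true := by
      simp [PySem.Dict.contains_counter, hva]
    rw [h1]
    simp only [Bool.not_true, Bool.false_or, PySem.List.count, decide_eq_decide]
    omega
  · have h1 : (PySem.Dict.counter arr).contains v = false := by
      simp [PySem.Dict.contains_counter, hva]
    have h0 : arr.count v = 0 := List.count_eq_zero.2 hva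
    rw [h1]
    simp only [Bool.not_false, Bool.true_or, PySem.List.count, h0, true_eq_decide_iff]
    omega

-- ===== VERDICT (by name: the statement is the Claim_ definition above) =====
theorem missingNumbers_spec : Claim_equal_missingNumbers := by
  intro arr brr _
  show missingNumbers arr brr = missingNumbers_alt arr brr
  set P : Int → Bool := fun v => decide (PySem.List.count arr v < PySem.List.count brr v) with hP
  set F : List Int := (PySem.List.sorted (PySem.Set.ofList brr) (fun x => x) false).filter P with hF
  have hP_iff : ∀ x, P x = true ↔ arr.count x < brr.count x := by
    intro x
    simp only [hP, PySem.List.count, decide_eq_true_eq]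
  -- A equals F (via the counter characterisation)
  have hA : missingNumbers arr brr = F := by
    rw [missingNumbers_A_eq]
    have hnd : ((PySem.Set.ofList brr).filter P).Nodup :=
      (PySem.Set.nodup_ofList brr).filter P
    rw [PySem.Set.ofList_eq_self_of_nodup _ hnd]
    have hperm : F.Perm ((PySem.Set.ofList brr).filter P) :=
      (PySem.List.sorted_perm (PySem.Set.ofList brr) (fun x => x) false).filter P
    have hpw : F.Pairwise (fun a b => a < b) :=
      (PySem.List.sorted_ofList_pairwise_lt brr).filter _
    apply PySem.List.sorted_eq_of_perm_of_pairwise_lt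
    all_goals first | exact hperm | exact hpw
  -- B equals F (via the merge-walk characterisation)
  have hB : missingNumbers_alt arr brr = F := by
    unfold missingNumbers_alt
    set G := goMissing (PySem.List.sorted arr (fun x => x) false)
      (PySem.List.sorted brr (fun x => x) false) with hG
    have hpa : (PySem.List.sorted arr (fun x => x) false).Pairwise (· ≤ ·) :=
      PySem.List.sorted_pairwise arr (fun x => x)
    have hpb : (PySem.List.sorted brr (fun x => x) false).Pairwise (· ≤ ·) :=
      PySem.List.sorted_pairwise brr (fun x => x)
    have hG_mem : ∀ x, x ∈ G ↔ x ∈ brr ∧ arr.count x < brr.count x := by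
      intro x
      rw [hG, goMissing_mem (PySem.List.sorted brr (fun x => x) false).length _ _ le_rfl hpa hpb]
      rw [(PySem.List.sorted_perm arr (fun x => x) false).count_eq,
          (PySem.List.sorted_perm brr (fun x => x) false).count_eq,
          PySem.List.mem_sorted]
    have hG_pw : G.Pairwise (fun a b => a < b) :=
      goMissing_pairwise (PySem.List.sorted brr (fun x => x) false).length _ _ le_rfl hpa hpb
    have hF_pw : F.Pairwise (fun a b => a < b) :=
      (PySem.List.sorted_ofList_pairwise_lt brr).filter _
    have hF_mem : ∀ x, x ∈ F ↔ x ∈ brr ∧ arr.count x < brr.count x := by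
      intro x
      rw [hF, List.mem_filter, PySem.List.mem_sorted, PySem.Set.mem_ofList, hP_iff]
    have hG_nd : G.Nodup := hG_pw.imp (fun h => ne_of_lt h)
    have hF_nd : F.Nodup := hF_pw.imp (fun h => ne_of_lt h)
    have hperm : G.Perm F :=
      (List.perm_ext_iff_of_nodup hG_nd hF_nd).2 (fun x => by rw [hG_mem, hF_mem])
    have e1 : PySem.List.sorted F (fun x => x) false = G := by
      apply PySem.List.sorted_eq_of_perm_of_pairwise_lt
      all_goals first | exact hperm | exact hG_pw
    have e2 : PySem.List.sorted F (fun x => x) false = F := by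
      apply PySem.List.sorted_eq_of_perm_of_pairwise_lt
      all_goals first | exact List.Perm.refl F | exact hF_pw
    rw [← e1, e2]
  rw [hA, hB]
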